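-- pv_equiv track=rewrite | github.com/cz-fish/advent-of-code | 2024/05.py | lines_good_and_bad
-- ===== SOURCE A (Python) =====
-- def lines_good_and_bad(lines, befores):
--     goods = []
--     bads = []
--     for ln in lines:
--         numbers = [int(x) for x in ln.split(',')]
--         assert len(numbers) % 2 == 1, f"Line length not odd; doesn't have a middle. {numbers}"
--         good = True
--         for i, num in enumerate(numbers):
--             for j in range(i+1, len(numbers)):
--                 if numbers[j] in befores[num]:
--                     good = False
--                     break
--             if not good:
--                 break
--         if good:
--             goods.append(numbers)
--         else:
--             bads.append(numbers)
--     return goods, bads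
-- ===== SOURCE B (Python) =====
-- def lines_good_and_bad(lines, befores):
--     def ok(numbers):
--         forbidden = set()
--         for x in numbers:
--             if x in forbidden:
--                 return False
--             forbidden |= set(befores[x])
--         return True
--     parsed = []
--     for ln in lines:
--         numbers = [int(x) for x in ln.split(',')]
--         assert len(numbers) % 2 == 1, f"Line length not odd; doesn't have a middle. {numbers}"
--         parsed.append(numbers)
--     return [n for n in parsed if ok(n)], [n for n in parsed if not ok(n)]
-- ===== Notes on version B (the rewrite author's own statement) =====
-- stated objective: faster
-- what changed: The O(k^2) nested pair scan per line disappears: lines are parsed in one staged pass, validity is decided by a single left-to-right pass maintaining a running forbidden set (union of befores[x] of earlier numbers), and goods/bads are produced as two comprehensions over the parsed lines instead of appending inside the scan loop.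
-- outside the precondition, e.g. on lines_good_and_bad(['1'], {}): A returns ([[1]], []), B raises KeyError
import Mathlib
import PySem

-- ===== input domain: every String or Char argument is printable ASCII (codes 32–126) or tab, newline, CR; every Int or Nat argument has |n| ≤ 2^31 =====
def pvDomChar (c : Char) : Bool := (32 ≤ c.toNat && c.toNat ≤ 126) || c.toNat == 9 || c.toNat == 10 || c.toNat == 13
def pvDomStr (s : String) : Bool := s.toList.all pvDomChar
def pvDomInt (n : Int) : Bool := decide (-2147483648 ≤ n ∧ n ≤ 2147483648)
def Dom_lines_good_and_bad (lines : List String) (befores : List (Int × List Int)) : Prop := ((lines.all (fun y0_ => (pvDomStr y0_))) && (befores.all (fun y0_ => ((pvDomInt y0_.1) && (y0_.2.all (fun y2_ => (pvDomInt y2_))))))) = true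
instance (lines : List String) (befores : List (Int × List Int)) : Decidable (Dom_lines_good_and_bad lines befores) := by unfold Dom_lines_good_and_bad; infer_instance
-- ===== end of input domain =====

-- B stages the work: parse all lines, judge each with one running-forbidden-set pass, emit goods/bads as two filters (objective: faster).


-- shared by both ports: [int(x) for x in ln.split(',')] (total form; Pre_ requires each piece to parse)
def pvParse (ln : String) : List Int :=
  ((PySem.Str.split? ln ",").getD []).map (fun s => (PySem.Int.ofStr? s).getD 0)

-- shared by both ports: befores[num] (dict lookup = first match; total form; Pre_ requires the key present)
def pvBef (befores : List (Int × List Int)) (num : Int) : List Int :=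
  (List.lookup num befores).getD []

-- ===== PORT A =====
-- A's inner check: for i, num in enumerate(numbers): for j in range(i+1, len): if numbers[j] in befores[num] → bad, double break
def pvGoodA (befores : List (Int × List Int)) : List Int → Bool
  | [] => true
  | num :: rest =>
      if rest.any (fun y => (pvBef befores num).contains y) then false
      else pvGoodA befores rest

def lines_good_and_bad (lines : List String) (befores : List (Int × List Int)) : List (List Int) × List (List Int) :=
  lines.foldl (fun acc ln =>
    let numbers := pvParse ln
    if pvGoodA befores numbers then (acc.1 ++ [numbers], acc.2) else (acc.1, acc.2 ++ [numbers]))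
    ([], [])

-- ===== PORT B =====
-- B's per-line judge ok(): one pass; x in forbidden → False (return), else forbidden |= set(befores[x])
def pvOkB (befores : List (Int × List Int)) : PySem.Set Int → List Int → Bool
  | _, [] => true
  | forbidden, x :: rest =>
      if PySem.Set.contains forbidden x then false
      else pvOkB befores (PySem.Set.union forbidden (pvBef befores x)) rest

-- B: staged — parse all lines, then two comprehensions filtered by ok
def lines_good_and_bad_alt (lines : List String) (befores : List (Int × List Int)) : List (List Int) × List (List Int) :=
  let parsed := lines.map pvParse
  (parsed.filter (fun n => pvOkB befores PySem.Set.empty n),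
   parsed.filter (fun n => !(pvOkB befores PySem.Set.empty n)))

-- ===== PRECONDITION & SPEC =====
-- Pre_ excludes lines where int() raises ValueError, where the odd-length assert fails, and lines containing a
-- number absent from befores: on the latter A raises KeyError unless the missing key happens never to be looked up
-- (the line's last element, or a position after the early break) — which keys A touches is an accident of its scan
-- order, and B's one-pass scan looks keys up at different points.
def Pre_lines_good_and_bad (lines : List String) (befores : List (Int × List Int)) : Prop :=
  ∀ ln ∈ lines,
    (∀ s ∈ (PySem.Str.split? ln ",").getD [], (PySem.Int.ofStr? s).isSome) ∧
    ((PySem.Str.split? ln ",").getD []).length % 2 = 1 ∧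
    (∀ n ∈ pvParse ln, (List.lookup n befores).isSome)

instance (lines : List String) (befores : List (Int × List Int)) : Decidable (Pre_lines_good_and_bad lines befores) := by
  unfold Pre_lines_good_and_bad; infer_instance

def pvWitness_lines_good_and_bad : List String × (List (Int × List Int)) :=
  (["1,2,1", "2"], [(1, [2]), (2, [])])

def Spec_lines_good_and_bad (lines : List String) (befores : List (Int × List Int)) (out : List (List Int) × List (List Int)) : Prop := out = lines_good_and_bad_alt lines befores
instance (lines : List String) (befores : List (Int × List Int)) (out : List (List Int) × List (List Int)) : Decidable (Spec_lines_good_and_bad lines befores out) := by unfold Spec_lines_good_and_bad; infer_instance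

-- ===== CLAIM (what is proved, stated in full; the proofs are below) =====
def Claim_equal_lines_good_and_bad : Prop := ∀ (lines : List String) (befores : List (Int × List Int)), Dom_lines_good_and_bad lines befores → Pre_lines_good_and_bad lines befores → Spec_lines_good_and_bad lines befores (lines_good_and_bad lines befores)

-- ===== LEMMAS AND PROOFS =====

-- B's running-set judge equals "no element already forbidden" AND A's pairwise check.
lemma pvOkB_eq (befores : List (Int × List Int)) :
    ∀ (l : List Int) (forb : PySem.Set Int),
      pvOkB befores forb l
        = (l.all (fun x => !(PySem.Set.contains forb x)) && pvGoodA befores l) := by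
  intro l
  induction l with
  | nil => intro forb; simp [pvOkB, pvGoodA]
  | cons x rest ih =>
    intro forb
    by_cases hx : x ∈ forb
    · have h1 : pvOkB befores forb (x :: rest) = false := by simp [pvOkB, hx]
      have h2 : (x :: rest).all (fun z => !(PySem.Set.contains forb z)) = false := by
        simp [hx]
      rw [h1, h2, Bool.false_and]
    · have h1 : pvOkB befores forb (x :: rest)
          = pvOkB befores (PySem.Set.union forb (pvBef befores x)) rest := by
        simp [pvOkB, hx]
      rw [h1, ih]
      by_cases hp : ∃ y ∈ rest, y ∈ pvBef befores x
      · obtain ⟨y, hy, hyb⟩ := hp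
        have l1 : rest.all
            (fun z => !(PySem.Set.contains (PySem.Set.union forb (pvBef befores x)) z)) = false := by
          apply List.all_eq_false.mpr
          refine ⟨y, hy, ?_⟩
          have hc : PySem.Set.contains (PySem.Set.union forb (pvBef befores x)) y = true :=
            (PySem.Set.contains_iff _ _).mpr ((PySem.Set.mem_union _ _ _).mpr (Or.inr hyb))
          simp only [hc, Bool.not_true]
          decide
        have l2 : pvGoodA befores (x :: rest) = false := by
          simp only [pvGoodA]
          rw [if_pos]
          exact List.any_eq_true.mpr ⟨y, hy, by simpa using hyb⟩
        rw [l1, l2, Bool.false_and, Bool.and_false]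
      · push Not at hp
        have l2 : pvGoodA befores (x :: rest) = pvGoodA befores rest := by
          simp only [pvGoodA]
          rw [if_neg]
          intro hany
          rcases List.any_eq_true.mp hany with ⟨y, hy, hyc⟩
          exact hp y hy (by simpa using hyc)
        have l1 : ∀ z ∈ rest,
            PySem.Set.contains (PySem.Set.union forb (pvBef befores x)) z
              = PySem.Set.contains forb z := by
          intro z hz
          by_cases hzf : z ∈ forb
          · rw [(PySem.Set.contains_iff _ _).mpr ((PySem.Set.mem_union _ _ _).mpr (Or.inl hzf)),
                (PySem.Set.contains_iff _ _).mpr hzf]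
          · have hu : z ∉ PySem.Set.union forb (pvBef befores x) := by
              intro hmem
              rcases (PySem.Set.mem_union _ _ _).mp hmem with h | h
              · exact hzf h
              · exact hp z hz h
            have hA : PySem.Set.contains (PySem.Set.union forb (pvBef befores x)) z = false :=
              Bool.eq_false_iff.mpr (fun hc => hu ((PySem.Set.contains_iff _ _).mp hc))
            have hB : PySem.Set.contains forb z = false :=
              Bool.eq_false_iff.mpr (fun hc => hzf ((PySem.Set.contains_iff _ _).mp hc))
            rw [hA, hB]
        have l3 : rest.all
            (fun z => !(PySem.Set.contains (PySem.Set.union forb (pvBef befores x)) z))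
              = rest.all (fun z => !(PySem.Set.contains forb z)) := by
          rw [Bool.eq_iff_iff]
          simp only [List.all_eq_true]
          constructor <;> intro h z hz
          · rw [← l1 z hz]; exact h z hz
          · rw [l1 z hz]; exact h z hz
        rw [l3, l2]
        simp [hx]

lemma pvOkB_empty (befores : List (Int × List Int)) (l : List Int) :
    pvOkB befores PySem.Set.empty l = pvGoodA befores l := by
  rw [pvOkB_eq]
  have h : l.all (fun x => !(PySem.Set.contains PySem.Set.empty x)) = true := by
    apply List.all_eq_true.mpr
    intro x _
    simp [PySem.Set.contains, PySem.Set.empty]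
  rw [h, Bool.true_and]

-- A's fold that appends into goods/bads equals partitioning the parsed lines by pvGoodA.
lemma foldl_partition (befores : List (Int × List Int)) :
    ∀ (lines : List String) (acc : List (List Int) × List (List Int)),
      lines.foldl (fun acc ln =>
        let numbers := pvParse ln
        if pvGoodA befores numbers then (acc.1 ++ [numbers], acc.2) else (acc.1, acc.2 ++ [numbers])) acc
      = (acc.1 ++ (lines.map pvParse).filter (fun n => pvGoodA befores n),
         acc.2 ++ (lines.map pvParse).filter (fun n => !(pvGoodA befores n))) := by
  intro lines
  induction lines with
  | nil => intro acc; simp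
  | cons ln rest ih =>
    intro acc
    simp only [List.foldl_cons, List.map_cons]
    rw [ih]
    by_cases hg : pvGoodA befores (pvParse ln)
    · simp [hg]
    · simp [hg]

-- ===== VERDICT (by name: the statement is the Claim_ definition above) =====
theorem lines_good_and_bad_spec : Claim_equal_lines_good_and_bad := by
  intro lines befores _ _
  unfold Spec_lines_good_and_bad lines_good_and_bad lines_good_and_bad_alt
  rw [foldl_partition]
  simp only [List.nil_append]
  have hf : ∀ n ∈ lines.map pvParse, pvOkB befores PySem.Set.empty n = pvGoodA befores n :=
    fun n _ => pvOkB_empty befores n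
  rw [List.filter_congr hf, List.filter_congr (fun n hn => by rw [hf n hn] : ∀ n ∈ lines.map pvParse, (!pvOkB befores PySem.Set.empty n) = !pvGoodA befores n)]
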